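-- pv_equiv track=rewrite | github.com/getjoey/Pathfinder | pathfinder.py | rearrangeConnections
-- ===== SOURCE A (Python) =====
-- def getGridPoint(pos): #returns current position in grid format
--   x = pos%4
--   y = (int)((pos-x)/4)
--   cp = [x,y]  #current position
--   return cp
--
-- def getValue(value,choice):
--   if(choice == 2):
--     value = value +1; #right
--   if(choice == 1):
--     value = value + 4; #down
--   if(choice == 0):
--     value = value -1; #left
--   if(choice == 3):
--     value = value -4; #up
--   return value
--
-- def rearrangeConnections(goal,value,connections):
--   gg = getGridPoint(goal)
--
--   #check all possible connections, and get their distances if you were to make that move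
--   distanceList=[None]*4
--   for i in range(len(connections)):
--     temp = getValue(value,connections[i])
--     xx = getGridPoint(temp)
--     dist = abs(gg[0] -xx[0]) + abs(gg[1]-xx[1])
--     distanceList[connections[i]] = [connections[i],dist]
--
--   #rearrange based of their distances to goal and prioritize them that way so their called in priority in the recursive function
--   for x in range(len(distanceList)):
--     if(distanceList[x] != None):
--       for y in range(x,len(distanceList)):
--         if(distanceList[y] != None):
--           if(distanceList[x][1] >= distanceList[y][1]):
--             #need to swap x and y values
--             t = distanceList[y].copy()
--             distanceList[y] = distanceList[x].copy()
--             distanceList[x] = t.copy()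
--
--   #now alter connection list to reflect this ordering
--   c = []
--   for i in distanceList:
--     if(i != None):
--       c.append(i[0])
--
--   return c
-- ===== SOURCE B (Python) =====
-- MOVES = {2: 1, 1: 4, 0: -1, 3: -4}  # move code -> cell offset (right, down, left, up)
--
-- def rearrangeConnections(goal, value, connections):
--   gx = goal % 4
--   gy = (goal - gx) // 4
--   def distance(c):
--     p = value + MOVES[c]
--     px = p % 4
--     return abs(gx - px) + abs(gy - (p - px) // 4)
--   moves = sorted(set(connections), reverse=True)  # distinct move codes, highest first
--   return sorted(moves, key=distance)              # stable: nearest first, ties keep the higher code first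
-- ===== Notes on version B (the rewrite author's own statement) =====
-- stated objective: simpler
-- what changed: A's padded 4-slot array with a nested in-place swap pass is replaced by a move-offset table and two library sorts of the distinct move codes (descending code, then a stable sort by distance to goal); Pre_ keeps exactly the inputs on which both programs return: codes above 3 or below -4 make A raise IndexError, and codes outside the four valid moves 0-3 (including the negative ones A reaches by negative list indexing) make B's move-table lookup raise KeyError.
-- outside the precondition, e.g. on rearrangeConnections(5, 2, [-1, 3]): A returns [3], B raises KeyError; on rearrangeConnections(5, 2, [-1]): A returns [-1], B raises KeyError; on rearrangeConnections(5, 2, [7]): A raises IndexError, B raises KeyError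
import Mathlib
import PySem

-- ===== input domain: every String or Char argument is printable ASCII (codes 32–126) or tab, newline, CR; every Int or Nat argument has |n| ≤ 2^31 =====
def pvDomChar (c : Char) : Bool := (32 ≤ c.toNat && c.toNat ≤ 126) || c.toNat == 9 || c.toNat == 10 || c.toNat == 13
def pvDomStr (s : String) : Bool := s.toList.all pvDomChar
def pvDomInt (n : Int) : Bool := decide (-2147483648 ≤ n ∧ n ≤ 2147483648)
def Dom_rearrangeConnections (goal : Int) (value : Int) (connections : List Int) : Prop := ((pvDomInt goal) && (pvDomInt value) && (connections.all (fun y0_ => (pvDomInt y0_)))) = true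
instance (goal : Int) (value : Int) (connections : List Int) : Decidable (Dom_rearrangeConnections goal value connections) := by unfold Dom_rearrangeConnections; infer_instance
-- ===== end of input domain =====

-- B replaces A's padded 4-slot array and nested in-place swap pass by a move-offset table
-- and two library sorts of the distinct move codes (descending code, then a stable sort by
-- distance to goal); objective: simpler.


-- ===== PORT A =====
-- shared module helpers (both Python versions use the same getGridPoint/getValue)
def getGridPoint (pos : Int) : Int × Int :=
  let x := PySem.Int.mod pos 4
  -- Python computes int((pos-x)/4) by float division; pos - x is divisible by 4 and
  -- |pos| ≤ 2^31 on Dom, so the float quotient is exact and equals floor division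
  let y := PySem.Int.floordiv (pos - x) 4
  (x, y)

def getValue (value : Int) (choice : Int) : Int :=
  let value := if choice == 2 then value + 1 else value
  let value := if choice == 1 then value + 4 else value
  let value := if choice == 0 then value - 1 else value
  let value := if choice == 3 then value - 4 else value
  value

-- first loop of A: distanceList[connections[i]] = [connections[i], dist]
-- (Python list assignment: a negative index wraps, out of range raises IndexError = none)
def pvBuildA (gg : Int × Int) (value : Int) (connections : List Int) :
    Option (List (Option (Int × Int))) :=
  connections.foldl (fun st c =>
    st.bind (fun dl =>
      let temp := getValue value c
      let xx := getGridPoint temp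
      let dist := |gg.1 - xx.1| + |gg.2 - xx.2|
      PySem.List.pySet? dl c (some (c, dist))))
    (some (List.replicate 4 none))

-- second loop of A: the nested swap pass over distanceList
-- inner body: one y step ('if distanceList[y] != None: if distanceList[x][1] >= distanceList[y][1]: swap')
def pvInnerA (x : Int) (dl : List (Option (Int × Int))) (y : Int) :
    List (Option (Int × Int)) :=
  match PySem.List.pyGetD dl y none, PySem.List.pyGetD dl x none with
  | some b, some a =>
    if a.2 ≥ b.2 then
      -- t = dl[y]; dl[y] = dl[x]; dl[x] = t
      PySem.List.pySetD (PySem.List.pySetD dl y (some a)) x (some b)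
    else dl
  -- dl[y] == None: skip (dl[x] is never None when this inner test runs)
  | _, _ => dl

-- outer body: one x step ('if distanceList[x] != None: for y in range(x, len(distanceList))')
def pvOuterA (dl : List (Option (Int × Int))) (x : Int) : List (Option (Int × Int)) :=
  if PySem.List.pyGetD dl x none ≠ none then
    (PySem.List.pyRange x dl.length 1).foldl (pvInnerA x) dl
  else dl

def pvSortPassA (dl0 : List (Option (Int × Int))) : List (Option (Int × Int)) :=
  (PySem.List.pyRange 0 dl0.length 1).foldl pvOuterA dl0

def rearrangeConnections (goal : Int) (value : Int) (connections : List Int) : List Int :=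
  let gg := getGridPoint goal
  match pvBuildA gg value connections with
  | none => []   -- Python raises IndexError here; excluded by Pre_
  | some dl =>
    let dl := pvSortPassA dl
    dl.foldl (fun c o => match o with | some p => c ++ [p.1] | none => c) []

-- ===== PORT B =====
-- MOVES = {2: 1, 1: 4, 0: -1, 3: -4}
def pvMOVES : PySem.Dict Int Int := PySem.Dict.ofList [(2, 1), (1, 4), (0, -1), (3, -4)]

def rearrangeConnections_alt (goal : Int) (value : Int) (connections : List Int) : List Int :=
  let gx := PySem.Int.mod goal 4
  let gy := PySem.Int.floordiv (goal - gx) 4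
  let distance := fun (c : Int) =>
    match PySem.Dict.get? pvMOVES c with
    | some d =>
      let p := value + d
      let px := PySem.Int.mod p 4
      |gx - px| + |gy - PySem.Int.floordiv (p - px) 4|
    | none => 0   -- Python raises KeyError here; excluded by Pre_
  -- moves = sorted(set(connections), reverse=True)
  let moves := PySem.List.sorted (PySem.Set.ofList connections) (fun c => c) true
  -- sorted(moves, key=distance)
  PySem.List.sorted moves distance false

-- ===== PRECONDITION & SPEC =====
-- Pre_ keeps exactly the inputs on which both programs return: A raises IndexError on a
-- code above 3 or below -4, and B's move-table lookup raises KeyError on any code outside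
-- the four valid moves 0..3 (including the negative codes A reaches by negative indexing).
def Pre_rearrangeConnections (goal : Int) (value : Int) (connections : List Int) : Prop :=
  ∀ c ∈ connections, 0 ≤ c ∧ c ≤ 3
instance (goal : Int) (value : Int) (connections : List Int) : Decidable (Pre_rearrangeConnections goal value connections) := by unfold Pre_rearrangeConnections; infer_instance

def pvWitness_rearrangeConnections : Int × Int × List Int := (6, 4, [0, 1, 2])

def Spec_rearrangeConnections (goal : Int) (value : Int) (connections : List Int) (out : List Int) : Prop := out = rearrangeConnections_alt goal value connections
instance (goal : Int) (value : Int) (connections : List Int) (out : List Int) : Decidable (Spec_rearrangeConnections goal value connections out) := by unfold Spec_rearrangeConnections; infer_instance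

-- ===== CLAIM (what is proved, stated in full; the proofs are below) =====
def Claim_equal_rearrangeConnections : Prop := ∀ (goal : Int) (value : Int) (connections : List Int), Dom_rearrangeConnections goal value connections → Pre_rearrangeConnections goal value connections → Spec_rearrangeConnections goal value connections (rearrangeConnections goal value connections)

-- ===== LEMMAS AND PROOFS =====

theorem r04 : PySem.List.pyRange 0 4 1 = [0,1,2,3] := by decide
theorem r14 : PySem.List.pyRange 1 4 1 = [1,2,3] := by decide
theorem r24 : PySem.List.pyRange 2 4 1 = [2,3] := by decide
theorem r34 : PySem.List.pyRange 3 4 1 = [3] := by decide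
theorem g0 (a b c d : Option (Int×Int)) : PySem.List.pyGetD [a,b,c,d] (0:Int) none = a := rfl
theorem g1 (a b c d : Option (Int×Int)) : PySem.List.pyGetD [a,b,c,d] (1:Int) none = b := rfl
theorem g2 (a b c d : Option (Int×Int)) : PySem.List.pyGetD [a,b,c,d] (2:Int) none = c := rfl
theorem g3 (a b c d : Option (Int×Int)) : PySem.List.pyGetD [a,b,c,d] (3:Int) none = d := rfl
theorem s0 (a b c d v : Option (Int×Int)) : PySem.List.pySetD [a,b,c,d] (0:Int) v = [v,b,c,d] := rfl
theorem s1 (a b c d v : Option (Int×Int)) : PySem.List.pySetD [a,b,c,d] (1:Int) v = [a,v,c,d] := rfl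
theorem s2 (a b c d v : Option (Int×Int)) : PySem.List.pySetD [a,b,c,d] (2:Int) v = [a,b,v,d] := rfl
theorem s3 (a b c d v : Option (Int×Int)) : PySem.List.pySetD [a,b,c,d] (3:Int) v = [a,b,c,v] := rfl

-- evaluation lemmas: only fire on a concrete 4-entry state
theorem pvOuterA_eval (e0 e1 e2 e3 : Option (Int×Int)) (x : Int) :
    pvOuterA [e0,e1,e2,e3] x =
      if PySem.List.pyGetD [e0,e1,e2,e3] x none ≠ none then
        (PySem.List.pyRange x 4 1).foldl (pvInnerA x) [e0,e1,e2,e3]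
      else [e0,e1,e2,e3] := rfl
theorem pvInnerA_eval (x y : Int) (e0 e1 e2 e3 : Option (Int×Int)) :
    pvInnerA x [e0,e1,e2,e3] y =
      match PySem.List.pyGetD [e0,e1,e2,e3] y none, PySem.List.pyGetD [e0,e1,e2,e3] x none with
      | some b, some a =>
        if a.2 ≥ b.2 then
          PySem.List.pySetD (PySem.List.pySetD [e0,e1,e2,e3] y (some a)) x (some b)
        else [e0,e1,e2,e3]
      | _, _ => [e0,e1,e2,e3] := rfl

-- ite lifting: keeps the evolving state concrete under every condition
theorem pvInnerA_ite (x y : Int) (c : Prop) [Decidable c] (A B : List (Option (Int×Int))) :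
    pvInnerA x (if c then A else B) y = if c then pvInnerA x A y else pvInnerA x B y := by
  split_ifs <;> rfl
theorem pvOuterA_ite (c : Prop) [Decidable c] (A B : List (Option (Int×Int))) (x : Int) :
    pvOuterA (if c then A else B) x = if c then pvOuterA A x else pvOuterA B x := by
  split_ifs <;> rfl
theorem foldl_ite_state {α β : Type} (f : β → α → β) (c : Prop) [Decidable c] (A B : β)
    (l : List α) : l.foldl f (if c then A else B) = if c then l.foldl f A else l.foldl f B := by
  split_ifs <;> rfl
theorem foldl_ite_list {α β : Type} (f : β → α → β) (init : β) (c : Prop) [Decidable c]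
    (A B : List α) :
    List.foldl f init (if c then A else B) = if c then List.foldl f init A else List.foldl f init B := by
  split_ifs <;> rfl

-- the swap pass followed by extraction = one stable sort by distance of the present
-- entries listed in descending slot order
set_option maxHeartbeats 40000000 in
theorem pvSort_eq (e0 e1 e2 e3 : Option (Int × Int)) :
    (pvSortPassA [e0, e1, e2, e3]).foldl
        (fun c o => match o with | some p => c ++ [p.1] | none => c) [] =
      (PySem.List.sorted (([e3, e2, e1, e0] : List (Option (Int × Int))).filterMap id)
        (fun p => p.2) false).map (fun p => p.1) := by
  rcases e0 with _ | ⟨c0, d0⟩ <;> rcases e1 with _ | ⟨c1, d1⟩ <;>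
    rcases e2 with _ | ⟨c2, d2⟩ <;> rcases e3 with _ | ⟨c3, d3⟩ <;>
  · simp only [pvSortPassA, List.length_cons, List.length_nil, Nat.reduceAdd, Nat.cast_ofNat,
      r04, r14, r24, r34, List.filterMap_cons, List.filterMap_nil, id,
      PySem.List.sorted_eq_foldl_insertBy, List.foldl_cons, List.foldl_nil,
      pvOuterA_eval, pvInnerA_eval, pvOuterA_ite, pvInnerA_ite, foldl_ite_state, foldl_ite_list,
      g0, g1, g2, g3, s0, s1, s2, s3, ne_eq, reduceCtorEq, not_false_eq_true,
      if_true, ge_iff_le, le_refl, ite_true, ite_self, PySem.List.insertBy,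
      List.map_cons, List.map_nil, List.nil_append, List.singleton_append, List.cons_append,
      List.append_nil, decide_eq_true_eq]
    repeat' (split_ifs <;> (try (exfalso; omega)) <;>
      try simp only [*, List.foldl_cons, List.foldl_nil, g0, g1, g2, g3, s0, s1, s2, s3,
        List.length_cons, List.length_nil, Nat.reduceAdd, Nat.cast_ofNat, r04, r14, r24, r34,
        pvOuterA_eval, pvInnerA_eval, pvOuterA_ite, pvInnerA_ite, foldl_ite_state, foldl_ite_list,
        PySem.List.insertBy, ne_eq, reduceCtorEq, not_false_eq_true, not_true_eq_false,
        if_true, if_false, ge_iff_le, le_refl, ite_true, ite_false, ite_self,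
        List.map_cons, List.map_nil, List.nil_append, List.singleton_append, List.cons_append,
        List.append_nil, decide_eq_true_eq])
    all_goals (try first | rfl | omega | (exfalso; omega))

-- the distance A computes for move code c (shared shape of both ports' arithmetic)
def pvD (goal value c : Int) : Int :=
  |(getGridPoint goal).1 - (getGridPoint (getValue value c)).1| +
  |(getGridPoint goal).2 - (getGridPoint (getValue value c)).2|

-- under Pre_, A's first loop fills slot k with (k, pvD k) exactly when k occurs in connections
theorem pvBuild_char (goal value : Int) :
    ∀ (cs : List Int), (∀ c ∈ cs, 0 ≤ c ∧ c ≤ 3) →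
      ∀ (m0 m1 m2 m3 : Option (Int × Int)),
      cs.foldl (fun st c =>
          st.bind (fun dl =>
            let temp := getValue value c
            let xx := getGridPoint temp
            let dist := |(getGridPoint goal).1 - xx.1| + |(getGridPoint goal).2 - xx.2|
            PySem.List.pySet? dl c (some (c, dist)))) (some [m0, m1, m2, m3]) =
        some [(if (0:Int) ∈ cs then some ((0:Int), pvD goal value 0) else m0),
              (if (1:Int) ∈ cs then some ((1:Int), pvD goal value 1) else m1),
              (if (2:Int) ∈ cs then some ((2:Int), pvD goal value 2) else m2),
              (if (3:Int) ∈ cs then some ((3:Int), pvD goal value 3) else m3)] := by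
  have step : ∀ (m0 m1 m2 m3 : Option (Int × Int)) (c : Int), 0 ≤ c → c ≤ 3 →
      (some [m0, m1, m2, m3]).bind (fun dl =>
          let temp := getValue value c
          let xx := getGridPoint temp
          let dist := |(getGridPoint goal).1 - xx.1| + |(getGridPoint goal).2 - xx.2|
          PySem.List.pySet? dl c (some (c, dist))) =
      some [(if c = 0 then some ((0:Int), pvD goal value 0) else m0),
            (if c = 1 then some ((1:Int), pvD goal value 1) else m1),
            (if c = 2 then some ((2:Int), pvD goal value 2) else m2),
            (if c = 3 then some ((3:Int), pvD goal value 3) else m3)] := by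
    intro m0 m1 m2 m3 c hc1 hc2
    interval_cases c <;> norm_num <;> rfl
  have mergeIf : ∀ (k c : Int) (cs : List Int) (P m : Option (Int × Int)),
      (if k ∈ cs then P else if c = k then P else m) = (if k ∈ c :: cs then P else m) := by
    intro k c cs P m
    simp only [List.mem_cons]
    by_cases h1 : k ∈ cs <;> by_cases h2 : c = k <;> simp_all [eq_comm]
  intro cs
  induction cs with
  | nil => intro _ m0 m1 m2 m3; simp
  | cons c cs ih =>
    intro hall m0 m1 m2 m3
    obtain ⟨h1, h2⟩ := hall c (by simp)
    have hrec := fun m0 m1 m2 m3 => ih (fun x hx => hall x (by simp [hx])) m0 m1 m2 m3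
    rw [List.foldl_cons, step m0 m1 m2 m3 c h1 h2, hrec, mergeIf, mergeIf, mergeIf, mergeIf]

-- stable sort commutes with mapping in the elements when the key factors through the map
theorem insertBy_map {α β : Type} (f : α → β) (b : α → α → Bool) (b' : β → β → Bool)
    (h : ∀ a c, b' (f a) (f c) = b a c) (x : α) :
    ∀ l : List α, PySem.List.insertBy b' (f x) (l.map f) = (PySem.List.insertBy b x l).map f := by
  intro l
  induction l with
  | nil => rfl
  | cons y ys ih =>
    simp only [List.map_cons, PySem.List.insertBy, h]
    split_ifs <;> simp [ih]

theorem map_sorted {α β : Type} (f : α → β) (key : β → Int) (l : List α) :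
    PySem.List.sorted (l.map f) key false = (PySem.List.sorted l (fun a => key (f a)) false).map f := by
  rw [PySem.List.sorted_eq_foldl_insertBy, PySem.List.sorted_eq_foldl_insertBy]
  suffices h : ∀ acc : List α,
      (l.map f).foldl (fun acc x => PySem.List.insertBy (fun a b => decide (key a < key b)) x acc) (acc.map f) =
      (l.foldl (fun acc x => PySem.List.insertBy (fun a b => decide (key (f a) < key (f b))) x acc) acc).map f by
    simpa using h []
  induction l with
  | nil => intro acc; rfl
  | cons y ys ih =>
    intro acc
    simp only [List.map_cons, List.foldl_cons]
    rw [insertBy_map f (fun a b => decide (key (f a) < key (f b))) (fun a b => decide (key a < key b)) (fun a c => rfl) y acc]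
    exact ih _

-- a stable sort only looks at keys of elements of the list: keys may be replaced
theorem insertBy_key_congr {α : Type} (k1 k2 : α → Int) (x : α) (hx : k1 x = k2 x) :
    ∀ acc : List α, (∀ a ∈ acc, k1 a = k2 a) →
      PySem.List.insertBy (fun a b => decide (k1 a < k1 b)) x acc =
      PySem.List.insertBy (fun a b => decide (k2 a < k2 b)) x acc := by
  intro acc
  induction acc with
  | nil => intro _; rfl
  | cons y ys ih =>
    intro h
    simp only [PySem.List.insertBy, hx, h y (by simp)]
    split_ifs <;> simp [ih (fun a ha => h a (by simp [ha]))]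

theorem sorted_key_congr {α : Type} (k1 k2 : α → Int) :
    ∀ (xs : List α), (∀ a ∈ xs, k1 a = k2 a) →
      PySem.List.sorted xs k1 false = PySem.List.sorted xs k2 false := by
  have main : ∀ (xs acc : List α), (∀ a ∈ xs, k1 a = k2 a) → (∀ a ∈ acc, k1 a = k2 a) →
      xs.foldl (fun acc x => PySem.List.insertBy (fun a b => decide (k1 a < k1 b)) x acc) acc =
      xs.foldl (fun acc x => PySem.List.insertBy (fun a b => decide (k2 a < k2 b)) x acc) acc := by
    intro xs
    induction xs with
    | nil => intro acc _ _; rfl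
    | cons x xs ih =>
      intro acc hxs hacc
      simp only [List.foldl_cons]
      rw [insertBy_key_congr k1 k2 x (hxs x (by simp)) acc hacc]
      exact ih _ (fun a ha => hxs a (by simp [ha]))
        (fun a ha => by
          rcases (PySem.List.mem_insertBy _ x a acc).mp ha with h1 | h2
          · exact h1 ▸ hxs x (by simp)
          · exact hacc a h2)
  intro xs h
  rw [PySem.List.sorted_eq_foldl_insertBy, PySem.List.sorted_eq_foldl_insertBy]
  exact main xs [] h (by simp)

-- ===== VERDICT (by name: the statement is the Claim_ definition above) =====
theorem rearrangeConnections_spec : Claim_equal_rearrangeConnections := by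
  intro goal value connections _ hpre
  unfold Spec_rearrangeConnections
  simp only [rearrangeConnections, rearrangeConnections_alt, pvBuildA]
  rw [show (List.replicate 4 (none : Option (Int × Int))) = [none, none, none, none] from rfl]
  rw [pvBuild_char goal value connections hpre]
  dsimp only
  rw [pvSort_eq]
  -- the present entries in descending slot order are the descending present codes paired with pvD
  have hfm : (([if (3:Int) ∈ connections then some ((3:Int), pvD goal value 3) else none,
               if (2:Int) ∈ connections then some ((2:Int), pvD goal value 2) else none,
               if (1:Int) ∈ connections then some ((1:Int), pvD goal value 1) else none,
               if (0:Int) ∈ connections then some ((0:Int), pvD goal value 0) else none] :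
               List (Option (Int × Int))).filterMap id) =
      (([3,2,1,0] : List Int).filter (fun k => decide (k ∈ connections))).map
        (fun c => (c, pvD goal value c)) := by
    by_cases h3 : (3:Int) ∈ connections <;> by_cases h2 : (2:Int) ∈ connections <;>
      by_cases h1 : (1:Int) ∈ connections <;> by_cases h0 : (0:Int) ∈ connections <;>
      simp [List.filter, h0, h1, h2, h3]
  rw [hfm]
  -- B's inner sort of the distinct codes is the same descending present-code list
  have hinner : PySem.List.sorted (PySem.Set.ofList connections) (fun c => c) true =
      ([3,2,1,0] : List Int).filter (fun k => decide (k ∈ connections)) := by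
    apply PySem.List.sorted_rev_eq_of_perm_of_pairwise_gt
    · rw [List.perm_ext_iff_of_nodup
        ((List.Nodup.filter _ (by decide))) (PySem.Set.nodup_ofList connections)]
      intro a
      simp only [List.mem_filter, PySem.Set.mem_ofList, List.mem_cons, List.not_mem_nil,
        decide_eq_true_eq]
      constructor
      · rintro ⟨_, ha⟩; exact ha
      · intro ha
        have := hpre a ha
        refine ⟨?_, ha⟩
        omega
    · exact List.Pairwise.filter _ (by decide)
  rw [hinner]
  rw [map_sorted (fun c => ((c : Int), pvD goal value c)) (fun p => p.2)]
  -- B's table-lookup distance agrees with A's distance on the four valid codes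
  rw [sorted_key_congr
    (fun c => match PySem.Dict.get? pvMOVES c with
      | some d =>
        let p := value + d
        let px := PySem.Int.mod p 4
        |PySem.Int.mod goal 4 - px| +
          |PySem.Int.floordiv (goal - PySem.Int.mod goal 4) 4 - PySem.Int.floordiv (p - px) 4|
      | none => 0)
    (fun c => pvD goal value c)
    (([3,2,1,0] : List Int).filter (fun k => decide (k ∈ connections)))
    (by
      intro a ha
      have hmem : a ∈ ([3,2,1,0] : List Int) := (List.mem_filter.mp ha).1
      fin_cases hmem <;> dsimp only
      · rw [show PySem.Dict.get? pvMOVES (3:Int) = some (-4) from rfl]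
        simp [pvD, getGridPoint, getValue, Int.sub_eq_add_neg]
      · rw [show PySem.Dict.get? pvMOVES (2:Int) = some 1 from rfl]
        simp [pvD, getGridPoint, getValue, Int.sub_eq_add_neg]
      · rw [show PySem.Dict.get? pvMOVES (1:Int) = some 4 from rfl]
        simp [pvD, getGridPoint, getValue, Int.sub_eq_add_neg]
      · rw [show PySem.Dict.get? pvMOVES (0:Int) = some (-1) from rfl]
        simp [pvD, getGridPoint, getValue, Int.sub_eq_add_neg])]
  -- a final map back to the codes
  simp [Function.comp_def]
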